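-- pv_equiv track=rewrite | github.com/nmw123456/fault_detection | tensorflow/frcnn-resnet101/inference/faultage_detect.py | get_best_faultage_points
-- ===== SOURCE A (Python) =====
-- def takeFirst(elem):
--   return elem[0]
--
-- def get_best_faultage_points(basePoint, pointList, yLenThresh):
--   pointListDraw = []
--   lineLen       = 0
--   for point in pointList:
--     if abs(point[1] - basePoint[1]) < yLenThresh:
--       pointListDraw.append(point)
--
--   # x轴排序
--   pointListDraw.sort(key=takeFirst)
--   if len(pointListDraw) > 1:
--     beginPoint = pointListDraw[0]
--     for point in pointListDraw:
--       lineLen += point[0] - beginPoint[0]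
--       beginPoint = point
--
--   return pointListDraw, lineLen
-- ===== SOURCE B (Python) =====
-- def takeFirst(elem):
--     return elem[0]
--
-- def get_best_faultage_points(basePoint, pointList, yLenThresh):
--     pointListDraw = sorted(
--         [p for p in pointList if abs(p[1] - basePoint[1]) < yLenThresh],
--         key=takeFirst)
--     lineLen = pointListDraw[-1][0] - pointListDraw[0][0] if len(pointListDraw) > 1 else 0
--     return pointListDraw, lineLen
-- ===== Notes on version B (the rewrite author's own statement) =====
-- stated objective: simpler
-- what changed: The telescoping accumulation loop over the sorted points is replaced by the closed form last-x minus first-x (the consecutive differences telescope), with the filter written as a comprehension.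
import Mathlib
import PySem

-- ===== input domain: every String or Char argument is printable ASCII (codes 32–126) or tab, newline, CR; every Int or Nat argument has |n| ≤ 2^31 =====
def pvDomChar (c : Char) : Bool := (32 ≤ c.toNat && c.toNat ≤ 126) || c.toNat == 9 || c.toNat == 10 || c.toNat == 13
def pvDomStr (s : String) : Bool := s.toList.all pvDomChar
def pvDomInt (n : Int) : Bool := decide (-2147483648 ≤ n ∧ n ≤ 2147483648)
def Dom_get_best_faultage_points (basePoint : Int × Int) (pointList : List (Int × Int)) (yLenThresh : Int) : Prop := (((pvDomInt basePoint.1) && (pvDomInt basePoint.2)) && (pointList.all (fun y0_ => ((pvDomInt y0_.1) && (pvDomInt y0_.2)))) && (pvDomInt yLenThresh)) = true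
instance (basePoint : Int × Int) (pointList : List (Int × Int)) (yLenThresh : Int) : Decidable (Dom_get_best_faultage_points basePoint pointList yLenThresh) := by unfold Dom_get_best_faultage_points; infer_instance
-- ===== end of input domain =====

-- B replaces A's telescoping accumulation loop by the closed form last-x minus first-x; objective: simpler.

-- ===== PORT A =====
def get_best_faultage_points (basePoint : Int × Int) (pointList : List (Int × Int)) (yLenThresh : Int) : (List (Int × Int)) × Int :=
  -- for point in pointList: if abs(point[1]-basePoint[1]) < yLenThresh: append
  let pointListDraw :=
    pointList.foldl (fun acc p => if |p.2 - basePoint.2| < yLenThresh then acc ++ [p] else acc) []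
  -- pointListDraw.sort(key=takeFirst)
  let pointListDraw := PySem.List.sorted pointListDraw (fun p => p.1) false
  if pointListDraw.length > 1 then
    match pointListDraw with
    | [] => (pointListDraw, (0 : Int))  -- unreachable under the length guard
    | b :: _ =>
      -- lineLen += point[0] - beginPoint[0]; beginPoint = point
      let r := pointListDraw.foldl (fun s p => (s.1 + (p.1 - s.2.1), p)) ((0 : Int), b)
      (pointListDraw, r.1)
  else (pointListDraw, 0)

-- ===== PORT B =====
def get_best_faultage_points_alt (basePoint : Int × Int) (pointList : List (Int × Int)) (yLenThresh : Int) : (List (Int × Int)) × Int :=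
  let pointListDraw :=
    PySem.List.sorted (pointList.filter (fun p => decide (|p.2 - basePoint.2| < yLenThresh)))
      (fun p => p.1) false
  let lineLen : Int :=
    if pointListDraw.length > 1 then
      (pointListDraw.getLast?.getD (0, 0)).1 - (pointListDraw.head?.getD (0, 0)).1
    else 0
  (pointListDraw, lineLen)

-- ===== PRECONDITION & SPEC =====
def Spec_get_best_faultage_points (basePoint : Int × Int) (pointList : List (Int × Int)) (yLenThresh : Int) (out : (List (Int × Int)) × Int) : Prop := out = get_best_faultage_points_alt basePoint pointList yLenThresh
instance (basePoint : Int × Int) (pointList : List (Int × Int)) (yLenThresh : Int) (out : (List (Int × Int)) × Int) : Decidable (Spec_get_best_faultage_points basePoint pointList yLenThresh out) := by unfold Spec_get_best_faultage_points; infer_instance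

-- ===== CLAIM (what is proved, stated in full; the proofs are below) =====
def Claim_equal_get_best_faultage_points : Prop := ∀ (basePoint : Int × Int) (pointList : List (Int × Int)) (yLenThresh : Int), Dom_get_best_faultage_points basePoint pointList yLenThresh → Spec_get_best_faultage_points basePoint pointList yLenThresh (get_best_faultage_points basePoint pointList yLenThresh)

-- ===== LEMMAS AND PROOFS =====

-- the telescoping loop: accumulated consecutive differences over bp :: l equal last minus bp
theorem telescope_fold (l : List (Int × Int)) (acc : Int) (bp : Int × Int) :
    (l.foldl (fun s p => (s.1 + (p.1 - s.2.1), p)) (acc, bp)).1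
      = acc + ((bp :: l).getLast (by simp)).1 - bp.1 := by
  induction l generalizing acc bp with
  | nil => simp
  | cons p t ih =>
    simp only [List.foldl_cons]
    rw [ih]
    have : (bp :: p :: t).getLast (by simp) = (p :: t).getLast (by simp) := by
      simp [List.getLast_cons]
    rw [this]
    ring

theorem get_best_faultage_points_spec : Claim_equal_get_best_faultage_points := by
  intro basePoint pointList yLenThresh _
  simp only [Spec_get_best_faultage_points, get_best_faultage_points, get_best_faultage_points_alt]
  rw [show pointList.foldl (fun acc p => if |p.2 - basePoint.2| < yLenThresh then acc ++ [p] else acc) [] = [] ++ pointList.filter (fun p => decide (|p.2 - basePoint.2| < yLenThresh)) from PySem.List.foldl_append_ite_eq_filter _ _ _, List.nil_append]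
  generalize PySem.List.sorted (pointList.filter (fun p => decide (|p.2 - basePoint.2| < yLenThresh))) (fun p => p.1) false = draw
  rcases draw with _ | ⟨b, _ | ⟨q, u⟩⟩
  · simp
  · simp
  · rw [if_pos (by simp only [List.length_cons]; omega)]
    simp only [List.foldl_cons]
    rw [telescope_fold]
    simp [List.getLast?_eq_some_getLast, List.getLast_cons, Prod.ext_iff]
    ring
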